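-- pv_equiv track=rewrite | github.com/SilentGamzee/AutoCooker | core/phases/base.py | _prioritize_files
-- ===== SOURCE A (Python) =====
-- def _prioritize_files(file_paths: list[str]) -> list[str]:
--     """
--     Sort files by importance for batching.
--
--     Priority order:
--     1. main.py, app.py, __init__.py
--     2. core/* files
--     3. web/index.html, web/js/app.js
--     4. Everything else
--     """
--     priority_1 = []  # Entry points
--     priority_2 = []  # Core logic
--     priority_3 = []  # Main UI files
--     priority_4 = []  # Everything else
--
--     for path in file_paths:
--         # Priority 1: Entry points
--         if any(p in path for p in ["main.py", "app.py", "__main__.py"]):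
--             priority_1.append(path)
--         # Priority 2: Core logic
--         elif path.startswith("core/") or path.startswith("src/"):
--             priority_2.append(path)
--         # Priority 3: Main UI
--         elif any(p in path for p in ["web/index.html", "web/js/app.js", "index.html", "app.js"]):
--             priority_3.append(path)
--         # Priority 4: Everything else
--         else:
--             priority_4.append(path)
--
--     return priority_1 + priority_2 + priority_3 + priority_4
-- ===== SOURCE B (Python) =====
-- def _prioritize_files(file_paths: list[str]) -> list[str]:
--     def priority(path: str) -> int:
--         if any(p in path for p in ["main.py", "app.py", "__main__.py"]):
--             return 1
--         if path.startswith("core/") or path.startswith("src/"):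
--             return 2
--         if any(p in path for p in ["web/index.html", "web/js/app.js", "index.html", "app.js"]):
--             return 3
--         return 4
--     return sorted(file_paths, key=priority)
-- ===== Notes on version B (the rewrite author's own statement) =====
-- stated objective: idiomatic
-- what changed: Replaces the four-list partition-and-concatenate loop with a priority key function and a single stable sorted(file_paths, key=priority), relying on sort stability for in-tier order.
import Mathlib
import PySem

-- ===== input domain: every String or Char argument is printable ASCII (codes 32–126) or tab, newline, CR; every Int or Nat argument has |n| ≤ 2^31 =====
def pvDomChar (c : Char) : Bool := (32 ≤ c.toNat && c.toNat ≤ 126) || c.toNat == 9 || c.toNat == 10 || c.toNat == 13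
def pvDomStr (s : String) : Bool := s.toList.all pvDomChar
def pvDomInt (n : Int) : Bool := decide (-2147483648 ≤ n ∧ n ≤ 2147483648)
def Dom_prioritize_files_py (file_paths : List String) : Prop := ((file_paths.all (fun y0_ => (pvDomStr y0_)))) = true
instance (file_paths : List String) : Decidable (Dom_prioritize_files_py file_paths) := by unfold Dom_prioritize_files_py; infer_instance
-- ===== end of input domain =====

-- B replaces A's four-bucket partition-and-concatenate loop with a priority key and one stable sort (idiomatic, same behaviour).

-- ===== PORT A =====
-- A-side helper: the body of A's for-loop (one path appended to its priority list)
def pvAStep (acc : List String × List String × List String × List String) (path : String) :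
    List String × List String × List String × List String :=
  if ["main.py", "app.py", "__main__.py"].any (fun p => PySem.Str.isIn p path) then
    (acc.1 ++ [path], acc.2.1, acc.2.2.1, acc.2.2.2)
  else if PySem.Str.startswith path "core/" || PySem.Str.startswith path "src/" then
    (acc.1, acc.2.1 ++ [path], acc.2.2.1, acc.2.2.2)
  else if ["web/index.html", "web/js/app.js", "index.html", "app.js"].any (fun p => PySem.Str.isIn p path) then
    (acc.1, acc.2.1, acc.2.2.1 ++ [path], acc.2.2.2)
  else
    (acc.1, acc.2.1, acc.2.2.1, acc.2.2.2 ++ [path])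

def prioritize_files_py (file_paths : List String) : List String :=
  let r := file_paths.foldl pvAStep ([], [], [], [])
  r.1 ++ r.2.1 ++ r.2.2.1 ++ r.2.2.2

-- ===== PORT B =====
-- B-side helper: the priority key
def pvPriority (path : String) : Int :=
  if ["main.py", "app.py", "__main__.py"].any (fun p => PySem.Str.isIn p path) then 1
  else if PySem.Str.startswith path "core/" || PySem.Str.startswith path "src/" then 2
  else if ["web/index.html", "web/js/app.js", "index.html", "app.js"].any (fun p => PySem.Str.isIn p path) then 3
  else 4

def prioritize_files_py_alt (file_paths : List String) : List String :=
  PySem.List.sorted file_paths pvPriority false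

-- ===== PRECONDITION & SPEC =====
def Spec_prioritize_files_py (file_paths : List String) (out : List String) : Prop := out = prioritize_files_py_alt file_paths
instance (file_paths : List String) (out : List String) : Decidable (Spec_prioritize_files_py file_paths out) := by unfold Spec_prioritize_files_py; infer_instance

-- ===== CLAIM (what is proved, stated in full; the proofs are below) =====
def Claim_equal_prioritize_files_py : Prop := ∀ (file_paths : List String), Dom_prioritize_files_py file_paths → Spec_prioritize_files_py file_paths (prioritize_files_py file_paths)

-- ===== LEMMAS AND PROOFS =====

-- the four priority buckets of a list, in order
def pvBuckets (l : List String) : List String :=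
  l.filter (fun p => decide (pvPriority p = 1)) ++ l.filter (fun p => decide (pvPriority p = 2)) ++
  l.filter (fun p => decide (pvPriority p = 3)) ++ l.filter (fun p => decide (pvPriority p = 4))

theorem pvPriority_cases (p : String) :
    pvPriority p = 1 ∨ pvPriority p = 2 ∨ pvPriority p = 3 ∨ pvPriority p = 4 := by
  unfold pvPriority; split_ifs <;> simp

theorem insertBy_prefix_false {α : Type} (before : α → α → Bool) (x : α) (l r : List α)
    (h : ∀ y ∈ l, before x y = false) :
    PySem.List.insertBy before x (l ++ r) = l ++ PySem.List.insertBy before x r := by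
  induction l with
  | nil => simp
  | cons a t ih =>
    have ha : before x a = false := h a (by simp)
    simp [PySem.List.insertBy, ha, ih (fun y hy => h y (by simp [hy]))]

theorem insertBy_all_true {α : Type} (before : α → α → Bool) (x : α) (r : List α)
    (h : ∀ y ∈ r, before x y = true) :
    PySem.List.insertBy before x r = x :: r := by
  cases r with
  | nil => simp [PySem.List.insertBy]
  | cons a t => simp [PySem.List.insertBy, h a (by simp)]

theorem mem_filter_pr {k : Int} {y : String} {l : List String}
    (hy : y ∈ l.filter (fun p => decide (pvPriority p = k))) : pvPriority y = k := by
  simpa using (List.of_mem_filter hy)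

theorem insertBy_buckets (pre : List String) (x : String) :
    PySem.List.insertBy (fun a b => decide (pvPriority a < pvPriority b)) x (pvBuckets pre)
      = pvBuckets (pre ++ [x]) := by
  have hfil : ∀ (k : Int), (pre ++ [x]).filter (fun p => decide (pvPriority p = k))
      = pre.filter (fun p => decide (pvPriority p = k)) ++ if pvPriority x = k then [x] else [] := by
    intro k; rw [List.filter_append]; split_ifs with h <;> simp [List.filter, h]
  rcases pvPriority_cases x with h | h | h | h
  · have e : pvBuckets pre = pre.filter (fun p => decide (pvPriority p = 1)) ++
        (pre.filter (fun p => decide (pvPriority p = 2)) ++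
         pre.filter (fun p => decide (pvPriority p = 3)) ++
         pre.filter (fun p => decide (pvPriority p = 4))) := by
      simp [pvBuckets, List.append_assoc]
    have hL : ∀ y ∈ pre.filter (fun p => decide (pvPriority p = 1)),
        (decide (pvPriority x < pvPriority y)) = false := by
      intro y hy; have := mem_filter_pr hy; simp [this, h]
    have hR : ∀ y ∈ (pre.filter (fun p => decide (pvPriority p = 2)) ++
         pre.filter (fun p => decide (pvPriority p = 3)) ++
         pre.filter (fun p => decide (pvPriority p = 4))),
        (decide (pvPriority x < pvPriority y)) = true := by
      intro y hy
      simp only [List.mem_append] at hy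
      rcases hy with (hy | hy) | hy <;>
        [have := mem_filter_pr hy; have := mem_filter_pr hy; have := mem_filter_pr hy] <;>
        simp [this, h]
    rw [e, insertBy_prefix_false _ _ _ _ hL, insertBy_all_true _ _ _ hR]
    simp [pvBuckets, hfil, h, List.append_assoc]
  · have e : pvBuckets pre = (pre.filter (fun p => decide (pvPriority p = 1)) ++
        pre.filter (fun p => decide (pvPriority p = 2))) ++
        (pre.filter (fun p => decide (pvPriority p = 3)) ++
         pre.filter (fun p => decide (pvPriority p = 4))) := by
      simp [pvBuckets, List.append_assoc]
    have hL : ∀ y ∈ (pre.filter (fun p => decide (pvPriority p = 1)) ++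
        pre.filter (fun p => decide (pvPriority p = 2))),
        (decide (pvPriority x < pvPriority y)) = false := by
      intro y hy
      simp only [List.mem_append] at hy
      rcases hy with hy | hy <;> [have := mem_filter_pr hy; have := mem_filter_pr hy] <;>
        simp [this, h]
    have hR : ∀ y ∈ (pre.filter (fun p => decide (pvPriority p = 3)) ++
         pre.filter (fun p => decide (pvPriority p = 4))),
        (decide (pvPriority x < pvPriority y)) = true := by
      intro y hy
      simp only [List.mem_append] at hy
      rcases hy with hy | hy <;> [have := mem_filter_pr hy; have := mem_filter_pr hy] <;>
        simp [this, h]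
    rw [e, insertBy_prefix_false _ _ _ _ hL, insertBy_all_true _ _ _ hR]
    simp [pvBuckets, hfil, h, List.append_assoc]
  · have e : pvBuckets pre = (pre.filter (fun p => decide (pvPriority p = 1)) ++
        pre.filter (fun p => decide (pvPriority p = 2)) ++
        pre.filter (fun p => decide (pvPriority p = 3))) ++
        pre.filter (fun p => decide (pvPriority p = 4)) := by
      simp [pvBuckets, List.append_assoc]
    have hL : ∀ y ∈ (pre.filter (fun p => decide (pvPriority p = 1)) ++
        pre.filter (fun p => decide (pvPriority p = 2)) ++
        pre.filter (fun p => decide (pvPriority p = 3))),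
        (decide (pvPriority x < pvPriority y)) = false := by
      intro y hy
      simp only [List.mem_append] at hy
      rcases hy with (hy | hy) | hy <;>
        [have := mem_filter_pr hy; have := mem_filter_pr hy; have := mem_filter_pr hy] <;>
        simp [this, h]
    have hR : ∀ y ∈ pre.filter (fun p => decide (pvPriority p = 4)),
        (decide (pvPriority x < pvPriority y)) = true := by
      intro y hy; have := mem_filter_pr hy; simp [this, h]
    rw [e, insertBy_prefix_false _ _ _ _ hL, insertBy_all_true _ _ _ hR]
    simp [pvBuckets, hfil, h, List.append_assoc]
  · have e : pvBuckets pre = (pre.filter (fun p => decide (pvPriority p = 1)) ++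
        pre.filter (fun p => decide (pvPriority p = 2)) ++
        pre.filter (fun p => decide (pvPriority p = 3)) ++
        pre.filter (fun p => decide (pvPriority p = 4))) ++ ([] : List String) := by
      simp [pvBuckets]
    have hL : ∀ y ∈ (pre.filter (fun p => decide (pvPriority p = 1)) ++
        pre.filter (fun p => decide (pvPriority p = 2)) ++
        pre.filter (fun p => decide (pvPriority p = 3)) ++
        pre.filter (fun p => decide (pvPriority p = 4))),
        (decide (pvPriority x < pvPriority y)) = false := by
      intro y hy
      simp only [List.mem_append] at hy
      rcases hy with ((hy | hy) | hy) | hy <;>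
        [have := mem_filter_pr hy; have := mem_filter_pr hy; have := mem_filter_pr hy;
         have := mem_filter_pr hy] <;>
        simp [this, h]
    have hR : ∀ y ∈ ([] : List String),
        (decide (pvPriority x < pvPriority y)) = true := by simp
    rw [e, insertBy_prefix_false _ _ _ _ hL, insertBy_all_true _ _ _ hR]
    simp [pvBuckets, hfil, h, List.append_assoc]

theorem foldl_insertBy_buckets (xs pre : List String) :
    xs.foldl (fun acc x => PySem.List.insertBy (fun a b => decide (pvPriority a < pvPriority b)) x acc)
      (pvBuckets pre) = pvBuckets (pre ++ xs) := by
  induction xs generalizing pre with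
  | nil => simp
  | cons x t ih =>
    have := ih (pre ++ [x])
    simpa [List.foldl, insertBy_buckets] using this

theorem alt_eq_buckets (xs : List String) : prioritize_files_py_alt xs = pvBuckets xs := by
  have h := foldl_insertBy_buckets xs []
  simpa [prioritize_files_py_alt, PySem.List.sorted_eq_foldl_insertBy, pvBuckets] using h

-- one step of A's loop, expressed through the priority key
theorem a_step (a1 a2 a3 a4 : List String) (x : String) :
    pvAStep (a1, a2, a3, a4) x
    = (a1 ++ if pvPriority x = 1 then [x] else [],
       a2 ++ if pvPriority x = 2 then [x] else [],
       a3 ++ if pvPriority x = 3 then [x] else [],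
       a4 ++ if pvPriority x = 4 then [x] else []) := by
  unfold pvAStep pvPriority
  split_ifs <;> simp_all

theorem a_foldl_buckets (xs : List String) (a1 a2 a3 a4 : List String) :
    xs.foldl pvAStep (a1, a2, a3, a4)
    = (a1 ++ xs.filter (fun p => decide (pvPriority p = 1)),
       a2 ++ xs.filter (fun p => decide (pvPriority p = 2)),
       a3 ++ xs.filter (fun p => decide (pvPriority p = 3)),
       a4 ++ xs.filter (fun p => decide (pvPriority p = 4))) := by
  induction xs generalizing a1 a2 a3 a4 with
  | nil => simp
  | cons x t ih =>
    rw [List.foldl_cons, a_step, ih]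
    rcases pvPriority_cases x with h | h | h | h <;>
      simp [h, List.append_assoc]

theorem a_eq_buckets (xs : List String) : prioritize_files_py xs = pvBuckets xs := by
  unfold prioritize_files_py
  rw [a_foldl_buckets]
  simp [pvBuckets, List.append_assoc]

-- ===== VERDICT (by name: the statement is the Claim_ definition above) =====
theorem prioritize_files_py_spec : Claim_equal_prioritize_files_py := by
  intro xs _
  unfold Spec_prioritize_files_py
  rw [a_eq_buckets, alt_eq_buckets]
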